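-- pv_equiv track=rewrite | github.com/mudigolambharath256-max/WE_SEC | python/core/context_profiler.py | extract_refusal_patterns
-- ===== SOURCE A (Python) =====
-- from typing import Dict, List, Optional
--
-- def extract_refusal_patterns(responses: List[str]) -> List[str]:
--     """
--     Extract common refusal patterns from responses.
--
--     Args:
--         responses: List of responses to analyze
--
--     Returns:
--         list: Common refusal patterns
--     """
--     patterns = []
--
--     common_refusals = [
--         "i cannot",
--         "i'm not able to",
--         "i won't",
--         "against my guidelines",
--         "i can't assist",
--     ]
--
--     for pattern in common_refusals:
--         count = sum(1 for r in responses if pattern in r.lower())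
--         if count > 0:
--             patterns.append(pattern)
--
--     return patterns
-- ===== SOURCE B (Python) =====
-- def extract_refusal_patterns(responses):
--     common_refusals = [
--         "i cannot",
--         "i'm not able to",
--         "i won't",
--         "against my guidelines",
--         "i can't assist",
--     ]
--     # Reduce to a single substring query per phrase: join all lowered responses
--     # into one haystack with '\n' (no phrase contains '\n', so no false
--     # cross-boundary match is possible).
--     haystack = "\n".join(r.lower() for r in responses)
--     return [p for p in common_refusals if p in haystack]
-- ===== Notes on version B (the rewrite author's own statement) =====
-- stated objective: faster
-- what changed: B reduces the problem to one substring query per phrase: it joins all lowered responses into a single newline-separated haystack (no phrase contains a newline, so no cross-boundary false match) and filters the phrase list by membership in that one string, instead of A's five independent counting scans over the whole response list.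
import Mathlib
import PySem

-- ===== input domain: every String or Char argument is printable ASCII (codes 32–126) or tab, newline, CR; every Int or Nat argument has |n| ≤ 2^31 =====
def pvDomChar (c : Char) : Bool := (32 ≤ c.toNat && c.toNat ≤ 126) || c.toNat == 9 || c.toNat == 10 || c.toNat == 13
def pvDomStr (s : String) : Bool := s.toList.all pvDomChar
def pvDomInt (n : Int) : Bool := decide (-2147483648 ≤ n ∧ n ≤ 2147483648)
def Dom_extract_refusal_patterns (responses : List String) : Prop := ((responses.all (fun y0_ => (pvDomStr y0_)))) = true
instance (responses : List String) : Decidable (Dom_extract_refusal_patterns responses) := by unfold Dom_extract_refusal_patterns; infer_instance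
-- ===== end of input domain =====

-- B joins all lowered responses into ONE '\n'-separated haystack (no phrase contains '\n', so
-- no cross-boundary false match) and answers each phrase with a single membership test, replacing
-- A's per-phrase counting scans over the whole response list; objective: faster (constant-factor, measured).

-- the fixed phrase list both sources share
def pvRefusals : List String :=
  ["i cannot", "i'm not able to", "i won't", "against my guidelines", "i can't assist"]

-- ===== PORT A =====
def extract_refusal_patterns (responses : List String) : List String :=
  pvRefusals.foldl
    (fun patterns pattern =>
      let count : Int := responses.foldl
        (fun acc r => if PySem.Str.isIn pattern (PySem.Str.lower r) then acc + 1 else acc) 0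
      if count > 0 then patterns ++ [pattern] else patterns)
    []

-- ===== PORT B =====
def extract_refusal_patterns_alt (responses : List String) : List String :=
  let haystack := PySem.Str.join "\n" (responses.map PySem.Str.lower)
  pvRefusals.foldl (fun acc p => if PySem.Str.isIn p haystack then acc ++ [p] else acc) []

-- ===== PRECONDITION & SPEC =====
def Spec_extract_refusal_patterns (responses : List String) (out : List String) : Prop := out = extract_refusal_patterns_alt responses
instance (responses : List String) (out : List String) : Decidable (Spec_extract_refusal_patterns responses out) := by unfold Spec_extract_refusal_patterns; infer_instance

-- ===== CLAIM (what is proved, stated in full; the proofs are below) =====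
def Claim_equal_extract_refusal_patterns : Prop := ∀ (responses : List String), Dom_extract_refusal_patterns responses → Spec_extract_refusal_patterns responses (extract_refusal_patterns responses)

-- ===== LEMMAS AND PROOFS =====

-- a c-free infix of a ++ c :: b is an infix of a or of b (and conversely)
theorem pv_infix_split {p a b : List Char} {c : Char} (hc : c ∉ p) :
    p <:+: a ++ c :: b ↔ p <:+: a ∨ p <:+: b := by
  constructor
  · rintro ⟨s, t, hst⟩
    by_cases h1 : s.length + p.length ≤ a.length
    · left
      have htake := congrArg (List.take (s.length + p.length)) hst
      rw [List.take_append_of_le_length h1] at htake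
      have hl : (s ++ p ++ t).take (s.length + p.length) = s ++ p := by
        have : s.length + p.length = (s ++ p).length := by simp
        rw [this, List.take_left]
      rw [hl] at htake
      obtain ⟨u, hu⟩ := htake ▸ List.take_prefix (s.length + p.length) a
      exact ⟨s, u, by rw [← hu]⟩
    · by_cases h2 : s.length ≤ a.length
      · exfalso
        apply hc
        have hlen : a.length < (s ++ p ++ t).length := by
          rw [hst]; simp
        have hlt : a.length < s.length + p.length := by omega
        have hR : (a ++ c :: b)[a.length]'(by simp) = c := by
          rw [List.getElem_append_right (le_refl a.length)]
          simp
        have hL : (s ++ p ++ t)[a.length]'hlen = p[a.length - s.length]'(by omega) := by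
          rw [List.getElem_append_left (by simp; omega : a.length < (s ++ p).length)]
          rw [List.getElem_append_right h2]
        have hfin : p[a.length - s.length]'(by omega) = c := by
          rw [← hL, List.getElem_of_eq hst, hR]
        exact hfin ▸ List.getElem_mem _
      · right
        push Not at h2
        have hdrop := congrArg (List.drop s.length) hst
        rw [List.append_assoc, List.drop_left] at hdrop
        have hR : (a ++ c :: b).drop s.length = b.drop (s.length - a.length - 1) := by
          have h3 : s.length = a.length + (s.length - a.length - 1 + 1) := by omega
          rw [h3, List.drop_append]
          simp [List.drop_eq_nil_of_le]
        rw [hR] at hdrop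
        have hpre : p <+: b.drop (s.length - a.length - 1) := ⟨t, hdrop⟩
        exact hpre.isInfix.trans (List.drop_suffix _ _).isInfix
  · rintro (h | h)
    · exact h.trans (List.prefix_append a (c :: b)).isInfix
    · exact h.trans ((List.suffix_cons c b).trans (List.suffix_append a (c :: b))).isInfix

-- membership of a nonempty '\n'-free phrase in the joined haystack = membership in some part
theorem pv_isIn_join {p : List Char} (hp : p ≠ []) (hc : '\n' ∉ p) (ls : List (List Char)) :
    PySem.Chars.isIn p (PySem.Chars.join ['\n'] ls) = true ↔ ∃ l ∈ ls, PySem.Chars.isIn p l = true := by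
  induction ls with
  | nil =>
    simp [PySem.Chars.join, List.intercalate, PySem.Chars.isIn_iff_infix, hp]
  | cons l rest ih =>
    cases rest with
    | nil =>
      simp [PySem.Chars.join, List.intercalate]
    | cons x xs =>
      rw [PySem.Chars.join_cons_cons]
      have : l ++ ['\n'] ++ PySem.Chars.join ['\n'] (x :: xs)
          = l ++ '\n' :: PySem.Chars.join ['\n'] (x :: xs) := by simp
      rw [this, PySem.Chars.isIn_iff_infix, pv_infix_split hc,
          ← PySem.Chars.isIn_iff_infix, ← PySem.Chars.isIn_iff_infix, ih]
      simp only [List.mem_cons]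
      constructor
      · rintro (h | ⟨m, hm, h⟩)
        · exact ⟨l, Or.inl rfl, h⟩
        · exact ⟨m, Or.inr hm, h⟩
      · rintro ⟨m, (rfl | hm), h⟩
        · exact Or.inl h
        · exact Or.inr ⟨m, hm, h⟩

-- the five phrases are nonempty and '\n'-free
theorem pv_refusals_ok : ∀ p ∈ pvRefusals, p.toList ≠ [] ∧ '\n' ∉ p.toList := by decide

-- ===== VERDICT (by name: the statement is the Claim_ definition above) =====
theorem extract_refusal_patterns_spec : Claim_equal_extract_refusal_patterns := by
  intro responses _
  unfold Spec_extract_refusal_patterns extract_refusal_patterns extract_refusal_patterns_alt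
  simp only []
  rw [PySem.List.foldl_append_ite_eq_filter, PySem.List.foldl_append_ite_eq_filter]
  simp only [List.nil_append]
  apply List.filter_congr
  intro p hp
  obtain ⟨hne, hnl⟩ := pv_refusals_ok p hp
  have hc : (responses.foldl (fun acc r => if PySem.Str.isIn p (PySem.Str.lower r) then acc + 1 else acc) (0 : Int))
      = (0 : Int) + (responses.countP (fun r => PySem.Str.isIn p (PySem.Str.lower r)) : Int) :=
    PySem.List.foldl_if_add_one _ _ _
  rw [hc, Bool.eq_iff_iff]
  simp only [zero_add, decide_eq_true_iff]
  rw [PySem.Str.isIn_eq, PySem.Str.toList_join, List.map_map]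
  have hs : ("\n" : String).toList = ['\n'] := by decide
  rw [hs]
  have hj := pv_isIn_join hne hnl (responses.map (fun r => (PySem.Str.lower r).toList))
  rw [Function.comp_def] at *
  rw [hj]
  constructor
  · intro h
    have h2 : 0 < responses.countP (fun r => PySem.Str.isIn p (PySem.Str.lower r)) := by exact_mod_cast h
    rcases List.countP_pos_iff.mp h2 with ⟨r, hr, hpr⟩
    exact ⟨(PySem.Str.lower r).toList, List.mem_map_of_mem hr, by rwa [PySem.Str.isIn_eq] at hpr⟩
  · rintro ⟨l, hl, hpl⟩
    rcases List.mem_map.mp hl with ⟨r, hr, rfl⟩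
    have h2 : 0 < responses.countP (fun r => PySem.Str.isIn p (PySem.Str.lower r)) :=
      List.countP_pos_iff.mpr ⟨r, hr, by rwa [PySem.Str.isIn_eq]⟩
    exact_mod_cast h2
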